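-- pv_equiv track=rewrite | github.com/fixxxera/Laina | Scripts/carnival-us.py | split_carib
-- ===== SOURCE A (Python) =====
-- def split_carib(ports):
--     bm = ['Kings Wharf, Bermuda']
--     cu = ['Santiago de Cuba', 'Cienfuegos', 'Havana']
--     wc = ['Costa Maya', 'Cozumel', 'Falmouth, Jamaica', 'George Town, Grand Cayman',
--           'Ocho Rios']
--
--     ec = ['Basseterre, St. Kitts', 'Bridgetown', 'Castries', 'Charlotte Amalie, St. Thomas',
--           'Fort De France', 'Kingstown, St. Vincent', 'Philipsburg', 'Ponce, Puerto Rico',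
--           'Punta Cana, Dominican Rep', 'Roseau', 'San Juan', 'St. Croix, U.S.V.I.',
--           "St. George's", "St. John's", 'Tortola, B.V.I']
--
--     result = []
--     iscu = False
--     isec = False
--     iswc = False
--     isbm = False
--     ports_list = []
--     for i in range(len(ports)):
--         if i == 0:
--             ports_list.append(ports[i])
--         else:
--             ports_list.append(ports[i])
--     for element in bm:
--         for p in ports_list:
--             if p in element:
--                 isbm = True
--     if not isbm:
--         for element in cu:
--             for p in ports_list:
--                 if p in element:
--                     iscu = True
--     if not iscu:
--         for element in wc:
--             for p in ports_list:
--                 if p in element: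
--                     iswc = True
--     if not iswc:
--         for element in ec:
--             for p in ports_list:
--                 if p in element:
--                     isec = True
--
--     if isbm:
--         result.append("Bermuda")
--         result.append("BM")
--         # result.append("CU")
--         return result
--     elif iscu:
--         result.append("Cuba")
--         result.append("C")
--         # result.append("CU")
--         return result
--     elif iswc:
--         result.append("West Carib")
--         result.append("C")
--         # result.append("WC")
--         return result
--     elif isec:
--         result.append("East Carib")
--         result.append("C")
--         # result.append("EC")
--         return result
--     else:
--         result.append("Carib")
--         result.append("C")
--         # result.append("")
--         return result
-- ===== SOURCE B (Python) =====
-- def split_carib(ports):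
--     groups = [
--         ['Kings Wharf, Bermuda'],
--         ['Santiago de Cuba', 'Cienfuegos', 'Havana'],
--         ['Costa Maya', 'Cozumel', 'Falmouth, Jamaica', 'George Town, Grand Cayman',
--          'Ocho Rios'],
--         ['Basseterre, St. Kitts', 'Bridgetown', 'Castries', 'Charlotte Amalie, St. Thomas',
--          'Fort De France', 'Kingstown, St. Vincent', 'Philipsburg', 'Ponce, Puerto Rico',
--          'Punta Cana, Dominican Rep', 'Roseau', 'San Juan', 'St. Croix, U.S.V.I.',
--          "St. George's", "St. John's", 'Tortola, B.V.I'],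
--     ]
--     outcomes = [['Bermuda', 'BM'], ['Cuba', 'C'], ['West Carib', 'C'],
--                 ['East Carib', 'C'], ['Carib', 'C']]
--
--     def rank(p):
--         i = 0
--         for g in groups:
--             if any(p in e for e in g):
--                 return i
--             i += 1
--         return i
--
--     best = 4
--     for p in ports:
--         best = min(best, rank(p))
--     return outcomes[best]
-- ===== Notes on version B (the rewrite author's own statement) =====
-- stated objective: alternative
-- what changed: Inverts the traversal: instead of A's four staged per-category flag-setting scans over all ports plus an if/elif chain, B computes a priority rank (0-4) per port, aggregates them with a running min over one pass of the ports, and indexes an outcomes table by the minimum rank.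
import Mathlib
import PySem

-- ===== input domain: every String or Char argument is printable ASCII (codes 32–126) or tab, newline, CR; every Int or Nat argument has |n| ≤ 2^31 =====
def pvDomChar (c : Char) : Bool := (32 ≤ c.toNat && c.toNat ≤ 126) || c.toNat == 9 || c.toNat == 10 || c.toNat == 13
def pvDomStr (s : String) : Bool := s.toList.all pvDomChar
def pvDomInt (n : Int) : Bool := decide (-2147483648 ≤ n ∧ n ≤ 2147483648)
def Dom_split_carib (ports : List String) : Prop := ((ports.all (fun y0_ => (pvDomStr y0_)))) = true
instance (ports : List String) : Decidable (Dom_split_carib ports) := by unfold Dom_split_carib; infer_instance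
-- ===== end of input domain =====

-- ===== PORT A =====
-- B replaces A's staged per-category flag scans and if/elif chain by a per-port minimum
-- priority rank aggregated in one pass, indexing an outcomes table (objective: alternative).

def bmListA : List String := ["Kings Wharf, Bermuda"]
def cuListA : List String := ["Santiago de Cuba", "Cienfuegos", "Havana"]
def wcListA : List String := ["Costa Maya", "Cozumel", "Falmouth, Jamaica",
  "George Town, Grand Cayman", "Ocho Rios"]
def ecListA : List String := ["Basseterre, St. Kitts", "Bridgetown", "Castries",
  "Charlotte Amalie, St. Thomas", "Fort De France", "Kingstown, St. Vincent", "Philipsburg",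
  "Ponce, Puerto Rico", "Punta Cana, Dominican Rep", "Roseau", "San Juan",
  "St. Croix, U.S.V.I.", "St. George's", "St. John's", "Tortola, B.V.I"]

-- 'for i in range(len(ports)): if i == 0: ports_list.append(ports[i]) else: ports_list.append(ports[i])'
def portsListA (ports : List String) : List String :=
  (PySem.List.pyRange 0 ports.length 1).foldl
    (fun acc i =>
      if i == 0 then acc ++ [PySem.List.pyGetD ports i ""]
      else acc ++ [PySem.List.pyGetD ports i ""]) []

-- 'for element in lst: for p in ports_list: if p in element: flag = True'
def flagLoop (lst : List String) (portsList : List String) (flag0 : Bool) : Bool :=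
  lst.foldl (fun flag element =>
    portsList.foldl (fun flag p =>
      if PySem.Str.isIn p element then true else flag) flag) flag0

def split_carib (ports : List String) : List String :=
  let portsList := portsListA ports
  let isbm := flagLoop bmListA portsList false
  let iscu := if !isbm then flagLoop cuListA portsList false else false
  let iswc := if !iscu then flagLoop wcListA portsList false else false
  let isec := if !iswc then flagLoop ecListA portsList false else false
  if isbm then ["Bermuda", "BM"]
  else if iscu then ["Cuba", "C"]
  else if iswc then ["West Carib", "C"]
  else if isec then ["East Carib", "C"]
  else ["Carib", "C"]

-- ===== PORT B =====
def groupsB : List (List String) := [bmListA, cuListA, wcListA, ecListA]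

def outcomesB : List (List String) :=
  [["Bermuda", "BM"], ["Cuba", "C"], ["West Carib", "C"], ["East Carib", "C"], ["Carib", "C"]]

-- 'def rank(p): i = 0; for g in groups: if any(p in e for e in g): return i; i += 1; return i'
def rankB (groups : List (List String)) (p : String) : Nat :=
  match groups with
  | [] => 0
  | g :: rest =>
    if g.any (fun e => PySem.Str.isIn p e) then 0 else 1 + rankB rest p

-- 'best = 4; for p in ports: best = min(best, rank(p)); return outcomes[best]'
def split_carib_alt (ports : List String) : List String :=
  let best := ports.foldl (fun m p => min m (rankB groupsB p)) 4
  outcomesB.getD best []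

-- ===== PRECONDITION & SPEC =====
def Spec_split_carib (ports : List String) (out : List String) : Prop := out = split_carib_alt ports
instance (ports : List String) (out : List String) : Decidable (Spec_split_carib ports out) := by unfold Spec_split_carib; infer_instance

-- ===== CLAIM (what is proved, stated in full; the proofs are below) =====
def Claim_equal_split_carib : Prop := ∀ (ports : List String), Dom_split_carib ports → Spec_split_carib ports (split_carib ports)

-- ===== LEMMAS AND PROOFS =====

theorem portsListA_eq (ports : List String) : portsListA ports = ports := by
  unfold portsListA
  simp only [ite_self]
  rw [PySem.List.foldl_pyRange_zero_pyGetD' ports "" (fun acc v => acc ++ [v]) []]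
  induction ports with
  | nil => rfl
  | cons x xs ih => simpa using ih

theorem flagLoop_inner (e : String) (ports : List String) (b : Bool) :
    ports.foldl (fun flag p => if PySem.Str.isIn p e then true else flag) b
      = (b || ports.any (fun p => PySem.Str.isIn p e)) := by
  induction ports generalizing b with
  | nil => simp
  | cons p ps ih =>
    simp only [List.foldl_cons, List.any_cons, ih]
    cases b <;> simp

theorem flagLoop_eq_any' (lst ports : List String) (b : Bool) :
    flagLoop lst ports b
      = (b || lst.any (fun element => ports.any (fun p => PySem.Str.isIn p element))) := by
  induction lst generalizing b with
  | nil => simp [flagLoop]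
  | cons e es ih =>
    simp only [flagLoop, List.foldl_cons] at *
    rw [flagLoop_inner, ih, List.any_cons, Bool.or_assoc]

theorem flagLoop_eq_any (lst ports : List String) :
    flagLoop lst ports false
      = lst.any (fun element => ports.any (fun p => PySem.Str.isIn p element)) := by
  rw [flagLoop_eq_any']; simp

-- per-port match predicate, from A's side
def matchesG (g : List String) (p : String) : Bool := g.any (fun e => PySem.Str.isIn p e)

theorem rankB_eq (p : String) :
    rankB groupsB p
      = (if matchesG bmListA p then 0
         else if matchesG cuListA p then 1
         else if matchesG wcListA p then 2
         else if matchesG ecListA p then 3 else 4) := by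
  simp only [groupsB, rankB, matchesG]
  split_ifs <;> rfl

-- fold-min facts
theorem foldMin_le_init (ports : List String) (f : String → Nat) (a : Nat) :
    ports.foldl (fun m p => min m (f p)) a ≤ a := by
  induction ports generalizing a with
  | nil => simp
  | cons p ps ih => exact le_trans (ih _) (min_le_left _ _)

theorem foldMin_le_mem (ports : List String) (f : String → Nat) {p : String}
    (hp : p ∈ ports) : ∀ (a : Nat),
    ports.foldl (fun m q => min m (f q)) a ≤ f p := by
  induction ports with
  | nil => cases hp
  | cons q qs ih =>
    intro a
    rcases List.mem_cons.mp hp with h | h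
    · subst h
      exact le_trans (foldMin_le_init qs f _) (min_le_right _ _)
    · exact ih h _

theorem le_foldMin (ports : List String) (f : String → Nat) (k : Nat)
    (hf : ∀ p ∈ ports, k ≤ f p) : ∀ (a : Nat), k ≤ a →
    k ≤ ports.foldl (fun m p => min m (f p)) a := by
  induction ports with
  | nil => intro a ha; simpa using ha
  | cons p ps ih =>
    intro a ha
    exact ih (fun q hq => hf q (List.mem_cons_of_mem _ hq))
      (min a (f p)) (le_min ha (hf p (List.mem_cons_self ..)))

-- outer/inner any commute: A scans elements then ports, B asks per port
theorem any_swap (lst ports : List String) :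
    lst.any (fun e => ports.any (fun p => PySem.Str.isIn p e))
      = ports.any (fun p => matchesG lst p) := by
  rw [Bool.eq_iff_iff]
  simp only [matchesG, List.any_eq_true]
  constructor
  · rintro ⟨e, he, p, hp, h⟩; exact ⟨p, hp, e, he, h⟩
  · rintro ⟨p, hp, e, he, h⟩; exact ⟨e, he, p, hp, h⟩

theorem not_any_forall {f : String → Bool} {l : List String}
    (h : ¬ l.any f = true) : ∀ q ∈ l, f q = false := by
  simp only [Bool.not_eq_true] at h
  intro q hq
  simpa using List.any_eq_false.mp h q hq

-- the running minimum of per-port ranks IS A's staged priority decision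
theorem best_eq (ports : List String) :
    ports.foldl (fun m p => min m (rankB groupsB p)) 4
      = (if ports.any (fun p => matchesG bmListA p) then 0
         else if ports.any (fun p => matchesG cuListA p) then 1
         else if ports.any (fun p => matchesG wcListA p) then 2
         else if ports.any (fun p => matchesG ecListA p) then 3 else 4) := by
  have hle := foldMin_le_init ports (fun p => rankB groupsB p) 4
  split_ifs with h1 h2 h3 h4
  · obtain ⟨p, hp, hm⟩ := List.any_eq_true.mp h1
    have hub : ports.foldl (fun m p => min m (rankB groupsB p)) 4 ≤ rankB groupsB p :=
      foldMin_le_mem ports (fun p => rankB groupsB p) hp 4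
    have hr : rankB groupsB p = 0 := by rw [rankB_eq]; simp [hm]
    omega
  · have hno1 := not_any_forall h1
    obtain ⟨p, hp, hm⟩ := List.any_eq_true.mp h2
    have hub : ports.foldl (fun m p => min m (rankB groupsB p)) 4 ≤ rankB groupsB p :=
      foldMin_le_mem ports (fun p => rankB groupsB p) hp 4
    have hr : rankB groupsB p = 1 := by rw [rankB_eq]; simp [hno1 p hp, hm]
    have hlb : (1:Nat) ≤ ports.foldl (fun m p => min m (rankB groupsB p)) 4 :=
      le_foldMin ports (fun p => rankB groupsB p) 1
      (fun q hq => by show _ ≤ rankB groupsB q; rw [rankB_eq]; simp only [hno1 q hq, Bool.false_eq_true, if_false]; split_ifs <;> omega)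
      4 (by omega)
    omega
  · have hno1 := not_any_forall h1
    have hno2 := not_any_forall h2
    obtain ⟨p, hp, hm⟩ := List.any_eq_true.mp h3
    have hub : ports.foldl (fun m p => min m (rankB groupsB p)) 4 ≤ rankB groupsB p :=
      foldMin_le_mem ports (fun p => rankB groupsB p) hp 4
    have hr : rankB groupsB p = 2 := by
      rw [rankB_eq]; simp [hno1 p hp, hno2 p hp, hm]
    have hlb : (2:Nat) ≤ ports.foldl (fun m p => min m (rankB groupsB p)) 4 :=
      le_foldMin ports (fun p => rankB groupsB p) 2
      (fun q hq => by
        show _ ≤ rankB groupsB q; rw [rankB_eq]; simp only [hno1 q hq, hno2 q hq, Bool.false_eq_true, if_false]; split_ifs <;> omega)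
      4 (by omega)
    omega
  · have hno1 := not_any_forall h1
    have hno2 := not_any_forall h2
    have hno3 := not_any_forall h3
    obtain ⟨p, hp, hm⟩ := List.any_eq_true.mp h4
    have hub : ports.foldl (fun m p => min m (rankB groupsB p)) 4 ≤ rankB groupsB p :=
      foldMin_le_mem ports (fun p => rankB groupsB p) hp 4
    have hr : rankB groupsB p = 3 := by
      rw [rankB_eq]; simp [hno1 p hp, hno2 p hp, hno3 p hp, hm]
    have hlb : (3:Nat) ≤ ports.foldl (fun m p => min m (rankB groupsB p)) 4 :=
      le_foldMin ports (fun p => rankB groupsB p) 3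
      (fun q hq => by
        show _ ≤ rankB groupsB q; rw [rankB_eq]
        simp only [hno1 q hq, hno2 q hq, hno3 q hq, Bool.false_eq_true, if_false]; split_ifs <;> omega)
      4 (by omega)
    omega
  · have hno1 := not_any_forall h1
    have hno2 := not_any_forall h2
    have hno3 := not_any_forall h3
    have hno4 := not_any_forall h4
    have hlb : (4:Nat) ≤ ports.foldl (fun m p => min m (rankB groupsB p)) 4 :=
      le_foldMin ports (fun p => rankB groupsB p) 4
      (fun q hq => by
        show _ ≤ rankB groupsB q; rw [rankB_eq]
        simp [hno1 q hq, hno2 q hq, hno3 q hq, hno4 q hq])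
      4 (by omega)
    omega

-- ===== VERDICT (by name: the statement is the Claim_ definition above) =====
theorem split_carib_spec : Claim_equal_split_carib := by
  intro ports _
  unfold Spec_split_carib split_carib split_carib_alt
  simp only [portsListA_eq, flagLoop_eq_any, any_swap, best_eq]
  cases h1 : (ports.any (fun p => matchesG bmListA p)) <;>
  cases h2 : (ports.any (fun p => matchesG cuListA p)) <;>
  cases h3 : (ports.any (fun p => matchesG wcListA p)) <;>
  cases h4 : (ports.any (fun p => matchesG ecListA p)) <;>
    simp [h1, h2, h3, h4, outcomesB]
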